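-- pv_equiv track=rewrite | github.com/yoonjonglee/PythonAlgorithmsForCodingTest | MyCodesSW_EDU_LGE/노즐교체.py | solve
-- ===== SOURCE A (Python) =====
-- def solve(A):
-- 	even_sum = [sum(row[0::2]) for row in A]
-- 	odd_sum = [sum(row[1::2]) for row in A]
-- 	sum1 = sum([max(i, j) for i, j in zip(odd_sum, even_sum)])
--
-- 	even_sum = [sum(col[0::2]) for col in zip(*A)]
-- 	odd_sum = [sum(col[1::2]) for col in zip(*A)]
-- 	sum2 = sum([max(i, j) for i, j in zip(odd_sum, even_sum)])
--
-- 	return max(sum1, sum2)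
-- ===== SOURCE B (Python) =====
-- def solve(A):
--     m = min((len(r) for r in A), default=0)
--     col_e = [0] * m
--     col_o = [0] * m
--     total_rows = 0
--     for i, row in enumerate(A):
--         e = o = 0
--         even = True
--         for x in row:
--             if even:
--                 e += x
--             else:
--                 o += x
--             even = not even
--         total_rows += max(e, o)
--         if i % 2 == 0:
--             col_e = [c + x for c, x in zip(col_e, row)]
--         else:
--             col_o = [c + x for c, x in zip(col_o, row)]
--     total_cols = sum(max(a, b) for a, b in zip(col_e, col_o))
--     return max(total_rows, total_cols)
-- ===== Notes on version B (the rewrite author's own statement) =====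
-- stated objective: alternative
-- what changed: Replaces A's four slice-comprehensions plus two zip(*A) transpositions by a single fold over the rows that maintains a running row total and per-column even/odd accumulator arrays (zip-truncated to the minimum row length), so the matrix is never transposed or sliced.
import Mathlib
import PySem

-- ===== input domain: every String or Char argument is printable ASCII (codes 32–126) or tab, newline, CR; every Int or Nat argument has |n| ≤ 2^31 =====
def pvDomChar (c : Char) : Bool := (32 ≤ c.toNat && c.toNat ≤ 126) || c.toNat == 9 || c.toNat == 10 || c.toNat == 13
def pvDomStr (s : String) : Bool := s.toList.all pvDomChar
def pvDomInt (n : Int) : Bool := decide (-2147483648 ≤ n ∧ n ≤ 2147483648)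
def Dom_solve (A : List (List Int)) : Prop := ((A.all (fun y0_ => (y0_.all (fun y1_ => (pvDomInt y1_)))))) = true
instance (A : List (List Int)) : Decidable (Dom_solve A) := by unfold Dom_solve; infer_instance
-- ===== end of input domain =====

-- B replaces A's slice-comprehensions and zip(*A) transpositions by one fold over the
-- rows maintaining a row total plus per-column even/odd accumulator lists (objective: alternative).

-- ===== PORT A =====
-- zip(*A) ported by hand: the columns j < (minimum row length); exact, including A = [].
def pyZipStar (A : List (List Int)) : List (List Int) :=
  match A with
  | [] => []
  | r :: rs =>
    let m := rs.foldl (fun acc row => min acc row.length) r.length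
    (List.range m).map (fun j => (r :: rs).map (fun row => row.getD j 0))

-- step 2 ≠ 0, so slice? always returns some; .getD [] only unwraps it.
def solve (A : List (List Int)) : Int :=
  let even_sum := A.map (fun row => ((PySem.List.slice? row (some 0) none 2).getD []).sum)
  let odd_sum := A.map (fun row => ((PySem.List.slice? row (some 1) none 2).getD []).sum)
  let sum1 := ((odd_sum.zip even_sum).map (fun p => max p.1 p.2)).sum
  let cols := pyZipStar A
  let even_sum2 := cols.map (fun col => ((PySem.List.slice? col (some 0) none 2).getD []).sum)
  let odd_sum2 := cols.map (fun col => ((PySem.List.slice? col (some 1) none 2).getD []).sum)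
  let sum2 := ((odd_sum2.zip even_sum2).map (fun p => max p.1 p.2)).sum
  max sum1 sum2

-- ===== PORT B =====
-- the inner `for x in row` loop of Source B: state ((e, o), even)
def rowEO (row : List Int) : (Int × Int) × Bool :=
  row.foldl (fun (q : (Int × Int) × Bool) x =>
    (if q.2 then (q.1.1 + x, q.1.2) else (q.1.1, q.1.2 + x), !q.2)) ((0, 0), true)

-- [c + x for c, x in zip(col, row)]
def colAdd (c row : List Int) : List Int := (c.zip row).map (fun p => p.1 + p.2)

-- the body of Source B's `for i, row in enumerate(A)` loop; state (total_rows, col_e, col_o)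
def bstep (st : Int × List Int × List Int) (ir : Int × List Int) : Int × List Int × List Int :=
  let q := rowEO ir.2
  let tot := st.1 + max q.1.1 q.1.2
  if PySem.Int.mod ir.1 2 = 0 then (tot, colAdd st.2.1 ir.2, st.2.2)
  else (tot, st.2.1, colAdd st.2.2 ir.2)

def solve_alt (A : List (List Int)) : Int :=
  let m := (PySem.List.minD (A.map (fun r => (r.length : Int))) (fun x => x) 0).toNat
  let st := (PySem.List.enumerate A 0).foldl bstep (0, List.replicate m 0, List.replicate m 0)
  let total_cols := ((st.2.1.zip st.2.2).map (fun p => max p.1 p.2)).sum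
  max st.1 total_cols

-- ===== PRECONDITION & SPEC =====
def Spec_solve (A : List (List Int)) (out : Int) : Prop := out = solve_alt A
instance (A : List (List Int)) (out : Int) : Decidable (Spec_solve A out) := by unfold Spec_solve; infer_instance

-- ===== CLAIM (what is proved, stated in full; the proofs are below) =====
def Claim_equal_solve : Prop := ∀ (A : List (List Int)), Dom_solve A → Spec_solve A (solve A)

-- ===== LEMMAS AND PROOFS =====

-- evens/odds split of a list: split2 l = (l[0::2], l[1::2])
def split2 {α : Type} : List α → List α × List α
  | [] => ([], [])
  | x :: t => (x :: (split2 t).2, (split2 t).1)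

theorem fm_split2 (n : Nat) : ∀ xs : List Int, xs.length ≤ n →
    (List.filterMap (fun k : Nat => xs[2*k]?) (List.range ((xs.length+1)/2)) = (split2 xs).1
     ∧ List.filterMap (fun k : Nat => xs[2*k+1]?) (List.range (xs.length/2)) = (split2 xs).2) := by
  induction n with
  | zero =>
    intro xs h
    have : xs = [] := List.eq_nil_of_length_eq_zero (Nat.le_zero.mp h)
    subst this; simp [split2]
  | succ n ih =>
    intro xs h
    match xs with
    | [] => simp [split2]
    | x :: t =>
      have ht := ih t (by simpa using Nat.lt_succ_iff.mp (Nat.lt_of_lt_of_le (by simp) h))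
      constructor
      · have hc : ((x :: t).length + 1) / 2 = t.length / 2 + 1 := by simp; omega
        rw [hc, List.range_succ_eq_map, List.filterMap_cons, List.filterMap_map]
        have : (fun k : Nat => (x :: t)[2*k]?) ∘ Nat.succ = fun k : Nat => t[2*k+1]? := by
          funext k
          have : 2 * Nat.succ k = 2*k+1+1 := by omega
          simp [this, List.getElem?_cons_succ]
        simp only [this]
        simp [ht.2, split2]
      · have hc : (x :: t).length / 2 = (t.length + 1) / 2 := by simp
        have hf : (fun k : Nat => (x :: t)[2*k+1]?) = fun k : Nat => t[2*k]? := by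
          funext k; simp [List.getElem?_cons_succ]
        rw [hc, hf, ht.1]
        simp [split2]

theorem slice0_fm (xs : List Int) :
    PySem.List.slice? xs (some 0) none 2
      = some (List.filterMap (fun k : Nat => xs[2*k]?) (List.range ((xs.length+1)/2))) := by
  simp only [PySem.List.slice?, PySem.List.sliceIndices]
  norm_num
  congr 1
  · congr 1; split_ifs with h <;> omega

theorem slice1_fm (xs : List Int) :
    PySem.List.slice? xs (some 1) none 2
      = some (List.filterMap (fun k : Nat => xs[2*k+1]?) (List.range (xs.length/2))) := by
  match xs with
  | [] => rfl
  | x :: t =>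
    simp only [PySem.List.slice?, PySem.List.sliceIndices]
    norm_num
    have hf : (fun k : Nat => (x :: t)[(1 + 2 * (k:Int)).toNat]?) = fun k : Nat => t[2*k]? := by
      funext k
      have : (1 + 2 * (k:Int)).toNat = 2*k+1 := by omega
      simp [this, List.getElem?_cons_succ]
    rw [hf]
    congr 1
    congr 1
    split_ifs with h <;> omega

theorem slice0_eq (xs : List Int) :
    PySem.List.slice? xs (some 0) none 2 = some (split2 xs).1 := by
  rw [slice0_fm]; exact congrArg some (fm_split2 xs.length xs le_rfl).1

theorem slice1_eq (xs : List Int) :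
    PySem.List.slice? xs (some 1) none 2 = some (split2 xs).2 := by
  rw [slice1_fm]; exact congrArg some (fm_split2 xs.length xs le_rfl).2

theorem split2_map (g : List Int → Int) (l : List (List Int)) :
    split2 (l.map g) = ((split2 l).1.map g, (split2 l).2.map g) := by
  induction l with
  | nil => rfl
  | cons x t ih => simp [split2, ih]

theorem rowEO_fold (row : List Int) : ∀ (e o : Int) (b : Bool),
    (row.foldl (fun (q : (Int × Int) × Bool) x =>
      (if q.2 then (q.1.1 + x, q.1.2) else (q.1.1, q.1.2 + x), !q.2)) ((e, o), b)).1
    = if b then (e + (split2 row).1.sum, o + (split2 row).2.sum)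
      else (e + (split2 row).2.sum, o + (split2 row).1.sum) := by
  induction row with
  | nil => intro e o b; cases b <;> simp [split2]
  | cons x t ih =>
    intro e o b
    cases b <;> simp [split2, List.foldl_cons, ih] <;> ring_nf

theorem rowEO_eq (row : List Int) :
    (rowEO row).1 = ((split2 row).1.sum, (split2 row).2.sum) := by
  simp [rowEO, rowEO_fold]

theorem fmod_two_succ (i : Int) (_h : 0 ≤ i) :
    (PySem.Int.mod (i + 1) 2 = 0) ↔ ¬ (PySem.Int.mod i 2 = 0) := by
  simp only [PySem.Int.mod, Int.fmod_eq_emod]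
  norm_num
  omega

theorem fold_enum (P : List (List Int)) : ∀ (i0 tot : Int) (ce co : List Int), 0 ≤ i0 →
    (PySem.List.enumerate P i0).foldl bstep (tot, ce, co)
    = (tot + (P.map (fun r => max (split2 r).1.sum (split2 r).2.sum)).sum,
       (if PySem.Int.mod i0 2 = 0 then (split2 P).1 else (split2 P).2).foldl colAdd ce,
       (if PySem.Int.mod i0 2 = 0 then (split2 P).2 else (split2 P).1).foldl colAdd co) := by
  induction P with
  | nil => intro i0 tot ce co h; simp [PySem.List.enumerate, split2]
  | cons r t ih =>
    intro i0 tot ce co h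
    have henum : PySem.List.enumerate (r :: t) i0 = (i0, r) :: PySem.List.enumerate t (i0 + 1) := by
      simp [PySem.List.enumerate]
    rw [henum, List.foldl_cons]
    have hb : bstep (tot, ce, co) (i0, r)
        = (tot + max (split2 r).1.sum (split2 r).2.sum,
           if PySem.Int.mod i0 2 = 0 then colAdd ce r else ce,
           if PySem.Int.mod i0 2 = 0 then co else colAdd co r) := by
      simp only [bstep, rowEO_eq]
      split_ifs <;> rfl
    rw [hb]
    by_cases hp : PySem.Int.mod i0 2 = 0
    · have hp1 : ¬ (PySem.Int.mod (i0 + 1) 2 = 0) := by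
        rw [fmod_two_succ i0 h]; exact fun hh => hh hp
      simp only [hp, if_true, ih (i0+1) _ _ _ (by omega), hp1, if_false]
      simp [split2, add_assoc]
    · have hp1 : PySem.Int.mod (i0 + 1) 2 = 0 := by
        rw [fmod_two_succ i0 h]; exact hp
      simp only [hp, if_false, ih (i0+1) _ _ _ (by omega), hp1, if_true]
      simp [split2, add_assoc]

theorem foldColAdd (R : List (List Int)) : ∀ (c : List Int), (∀ r ∈ R, c.length ≤ r.length) →
    R.foldl colAdd c
    = (List.range c.length).map (fun j => c.getD j 0 + (R.map (fun r => r.getD j 0)).sum) := by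
  induction R with
  | nil =>
    intro c _
    simp only [List.foldl_nil, List.map_nil, List.sum_nil, add_zero]
    refine (List.ext_getElem (by simp) ?_).symm
    intro j h1 h2
    simp [List.getElem?_eq_getElem h2]
  | cons r t ih =>
    intro c hc
    have hlen : (colAdd c r).length = c.length := by
      simp [colAdd]
      exact hc r (by simp)
    rw [List.foldl_cons, ih (colAdd c r) (by
      intro x hx; rw [hlen]; exact hc x (List.mem_cons_of_mem _ hx))]
    rw [hlen]
    refine List.map_congr_left ?_
    intro j hj
    have hjc : j < c.length := List.mem_range.mp hj
    have hjr : j < r.length := lt_of_lt_of_le hjc (hc r (by simp))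
    have hg : (colAdd c r).getD j 0 = c.getD j 0 + r.getD j 0 := by
      rw [List.getD_eq_getElem _ _ (by rw [hlen]; exact hjc),
          List.getD_eq_getElem _ _ hjc, List.getD_eq_getElem _ _ hjr]
      simp [colAdd]
    rw [hg]
    simp [add_assoc]

theorem minfold_cast (rs : List (List Int)) : ∀ (a : Nat),
    (rs.map (fun r => (r.length : Int))).foldl min (a : Int)
      = ((rs.foldl (fun acc row => min acc row.length) a : Nat) : Int) := by
  induction rs with
  | nil => intro a; simp
  | cons r t ih =>
    intro a
    simp only [List.map_cons, List.foldl_cons, ← Nat.cast_min]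
    exact ih _

theorem minfold_le (rs : List (List Int)) : ∀ (a : Nat),
    rs.foldl (fun acc row => min acc row.length) a ≤ a ∧
    ∀ r ∈ rs, rs.foldl (fun acc row => min acc row.length) a ≤ r.length := by
  induction rs with
  | nil => intro a; simp
  | cons r t ih =>
    intro a
    simp only [List.foldl_cons]
    constructor
    · exact le_trans (ih (min a r.length)).1 (min_le_left _ _)
    · intro x hx
      rcases List.mem_cons.mp hx with h | h
      · subst h; exact le_trans (ih _).1 (min_le_right _ _)
      · exact (ih _).2 x h

theorem mem_split2 {α : Type} (l : List α) :
    ∀ x, (x ∈ (split2 l).1 → x ∈ l) ∧ (x ∈ (split2 l).2 → x ∈ l) := by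
  induction l with
  | nil => intro x; simp [split2]
  | cons y t ih =>
    intro x
    constructor
    · intro hx
      rcases List.mem_cons.mp hx with h | h
      · simp [h]
      · exact List.mem_cons_of_mem _ ((ih x).2 h)
    · intro hx
      exact List.mem_cons_of_mem _ ((ih x).1 hx)

theorem getD_rep (mN j : Nat) : (List.replicate mN (0:Int)).getD j 0 = 0 := by
  by_cases h : j < mN
  · rw [List.getD_eq_getElem _ _ (by simpa using h)]
    simp
  · rw [List.getD_eq_default _ _ (by simpa using Nat.le_of_not_lt h)]

-- ===== VERDICT =====
theorem solve_spec : Claim_equal_solve := by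
  intro A _
  show solve A = solve_alt A
  match A with
  | [] => rfl
  | r :: rs =>
    set mN := rs.foldl (fun acc row => min acc row.length) r.length with hmN
    have hminle := minfold_le rs r.length
    have hle : ∀ x ∈ r :: rs, mN ≤ x.length := by
      intro x hx
      rcases List.mem_cons.mp hx with h | h
      · subst h; exact hminle.1
      · exact hminle.2 x h
    have hm : (PySem.List.minD ((r :: rs).map (fun r' => (r'.length : Int))) (fun x => x) 0).toNat = mN := by
      simp only [List.map_cons, PySem.List.minD, PySem.List.min?_id_cons, Option.getD_some]
      rw [minfold_cast rs r.length]
      simp only [Int.toNat_natCast]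
      exact hmN.symm
    have h0 : PySem.Int.mod 0 2 = 0 := by decide
    have hfold := fold_enum (r :: rs) 0 0 (List.replicate mN 0) (List.replicate mN 0) le_rfl
    rw [h0] at hfold
    simp only [if_true, zero_add] at hfold
    have hev := foldColAdd (split2 (r :: rs)).1 (List.replicate mN (0:Int)) (by
      intro x hx
      simp only [List.length_replicate]
      exact hle x ((mem_split2 (r :: rs) x).1 hx))
    have hod := foldColAdd (split2 (r :: rs)).2 (List.replicate mN (0:Int)) (by
      intro x hx
      simp only [List.length_replicate]
      exact hle x ((mem_split2 (r :: rs) x).2 hx))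
    simp only [List.length_replicate, getD_rep, zero_add] at hev hod
    simp only [solve, solve_alt, pyZipStar, slice0_eq, slice1_eq, Option.getD_some,
      hm, hfold, hev, hod, List.zip_map', List.map_map]
    rw [← hmN]
    congr 1
    · exact congrArg List.sum (List.map_congr_left (fun a _ => max_comm _ _))
    · refine congrArg List.sum (List.map_congr_left ?_)
      intro j hj
      simp only [Function.comp]
      rw [split2_map]
      exact max_comm _ _
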